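-- pv_equiv track=rewrite | github.com/dylcmonty/scraper | scrape_csa_hauls.py | assign_recipe_ids
-- ===== SOURCE A (Python) =====
-- from typing import Dict, List, Optional, Tuple
--
-- def assign_recipe_ids(entries: List[Dict], lookup: Dict[str, str], start_counter: int) -> int:
--     """
--     Assign sequential recipe IDs to entries, reusing existing IDs when
--     possible.  Returns the next available counter after assignment.
--     """
--     counter = start_counter
--     for entry in entries:
--         alias = entry["alias"]
--         if alias in lookup:
--             entry["recipe_id"] = lookup[alias]
--         else:
--             entry["recipe_id"] = f"{counter:03d}"
--             lookup[alias] = entry["recipe_id"]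
--             counter += 1
--     return counter
-- ===== SOURCE B (Python) =====
-- def assign_recipe_ids(entries, lookup, start_counter):
--     """Two-phase version: build the alias->id table first, then apply it.
--
--     Pass 1 collects the aliases that need a fresh id, in first-occurrence
--     order; pass 2 extends lookup with sequential ids; pass 3 stamps every
--     entry.  Mutates lookup and the entry dicts in place, like the original.
--     """
--     seen = set(lookup)
--     new_aliases = []
--     for entry in entries:
--         alias = entry["alias"]
--         if alias not in seen:
--             seen.add(alias)
--             new_aliases.append(alias)
--     for offset, alias in enumerate(new_aliases):
--         lookup[alias] = f"{start_counter + offset:03d}"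
--     for entry in entries:
--         entry["recipe_id"] = lookup[entry["alias"]]
--     return start_counter + len(new_aliases)
-- ===== Notes on version B (the rewrite author's own statement) =====
-- stated objective: alternative
-- what changed: Replaces the single interleaved assign-as-you-go loop by three separate phases: a first pass that collects the aliases needing fresh ids with a membership set, a pass that extends the lookup table with sequential ids, and a final pass that stamps every entry from the completed table; the returned counter becomes start_counter + len(new_aliases).
import Mathlib
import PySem

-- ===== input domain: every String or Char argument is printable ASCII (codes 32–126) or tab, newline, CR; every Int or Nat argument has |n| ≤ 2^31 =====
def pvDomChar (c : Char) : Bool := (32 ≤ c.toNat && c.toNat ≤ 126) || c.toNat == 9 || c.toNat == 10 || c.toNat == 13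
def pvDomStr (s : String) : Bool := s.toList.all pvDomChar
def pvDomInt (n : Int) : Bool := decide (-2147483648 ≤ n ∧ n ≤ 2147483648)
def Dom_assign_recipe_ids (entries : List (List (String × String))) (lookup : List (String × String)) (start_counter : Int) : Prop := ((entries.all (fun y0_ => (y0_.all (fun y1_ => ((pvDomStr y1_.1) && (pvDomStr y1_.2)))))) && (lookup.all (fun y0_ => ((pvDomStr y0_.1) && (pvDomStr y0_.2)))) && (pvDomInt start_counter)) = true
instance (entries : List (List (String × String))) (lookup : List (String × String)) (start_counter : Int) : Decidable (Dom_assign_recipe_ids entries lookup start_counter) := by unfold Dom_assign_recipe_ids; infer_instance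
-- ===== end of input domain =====

-- B builds the al→id table and the counter in separate phases instead of A's interleaved loop;
-- equivalence is about the RETURN value only (both Pythons perform the same in-place mutations of
-- lookup and the entry dicts; the ports compute the returned counter).

-- f"{n:03d}": zero-pad to width 3, sign counted in the width (exact for this format on Int)
def pvFmt03 (n : Int) : String :=
  let ds := PySem.Int.toChars (if n < 0 then -n else n)
  let sign : List Char := if n < 0 then ['-'] else []
  String.ofList (sign ++ List.replicate (3 - (sign.length + ds.length)) '0' ++ ds)

-- ===== PORT A =====
-- one loop over entries carrying (lookup, counter); entry["alias"] is a dict get (KeyError → Pre_)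
def assign_recipe_ids (entries : List (List (String × String))) (lookup : List (String × String)) (start_counter : Int) : Int :=
  (entries.foldl
    (fun (st : PySem.Dict String String × Int) entry =>
      match (PySem.Dict.mk entry).get? "alias" with
      | none => st  -- Python raises KeyError here; excluded by Pre_
      | some al =>
        if st.1.contains al then st
        else (st.1.insert al (pvFmt03 st.2), st.2 + 1))
    (PySem.Dict.mk lookup, start_counter)).2

-- ===== PORT B =====
-- pass 1 of Source B: seen = set(lookup); collect new_aliases in first-occurrence order;
-- passes 2 and 3 of Source B only mutate lookup/entries; the return value is start + len(new_aliases)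
def assign_recipe_ids_alt (entries : List (List (String × String))) (lookup : List (String × String)) (start_counter : Int) : Int :=
  let seen0 : PySem.Set String := PySem.Set.ofList ((PySem.Dict.mk lookup).keys)
  let st := entries.foldl
    (fun (st : PySem.Set String × List String) entry =>
      match (PySem.Dict.mk entry).get? "alias" with
      | none => st  -- Python raises KeyError here; excluded by Pre_
      | some al =>
        if PySem.Set.contains st.1 al then st
        else (PySem.Set.add st.1 al, st.2 ++ [al]))
    (seen0, [])
  start_counter + st.2.length

-- ===== PRECONDITION & SPEC =====
-- Pre_ excludes only inputs where Python A raises KeyError: an entry without the "alias" key.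
def Pre_assign_recipe_ids (entries : List (List (String × String))) (lookup : List (String × String)) (start_counter : Int) : Prop :=
  ∀ e ∈ entries, (PySem.Dict.mk e).contains "alias" = true
instance (entries : List (List (String × String))) (lookup : List (String × String)) (start_counter : Int) : Decidable (Pre_assign_recipe_ids entries lookup start_counter) := by unfold Pre_assign_recipe_ids; infer_instance
def pvWitness_assign_recipe_ids : (List (List (String × String))) × (List (String × String)) × Int :=
  ([[("alias", "soup")], [("alias", "kale")], [("alias", "soup")]], [("kale", "007")], 3)

def Spec_assign_recipe_ids (entries : List (List (String × String))) (lookup : List (String × String)) (start_counter : Int) (out : Int) : Prop := out = assign_recipe_ids_alt entries lookup start_counter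
instance (entries : List (List (String × String))) (lookup : List (String × String)) (start_counter : Int) (out : Int) : Decidable (Spec_assign_recipe_ids entries lookup start_counter out) := by unfold Spec_assign_recipe_ids; infer_instance

-- ===== CLAIM (what is proved, stated in full; the proofs are below) =====
def Claim_equal_assign_recipe_ids : Prop := ∀ (entries : List (List (String × String))) (lookup : List (String × String)) (start_counter : Int), Dom_assign_recipe_ids entries lookup start_counter → Pre_assign_recipe_ids entries lookup start_counter → Spec_assign_recipe_ids entries lookup start_counter (assign_recipe_ids entries lookup start_counter)

-- ===== LEMMAS AND PROOFS =====

-- A's dict state and B's seen-set state agree on membership, so the two folds advance in lockstep: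
-- A's counter grows exactly when B appends a new al.
theorem pv_fold_invariant (entries : List (List (String × String)))
    (d : PySem.Dict String String) (c : Int) (s : PySem.Set String) (l : List String)
    (h : ∀ a : String, d.contains a = PySem.Set.contains s a) :
    (entries.foldl
      (fun (st : PySem.Dict String String × Int) entry =>
        match (PySem.Dict.mk entry).get? "alias" with
        | none => st
        | some al =>
          if st.1.contains al then st
          else (st.1.insert al (pvFmt03 st.2), st.2 + 1)) (d, c)).2
    + (l.length : Int)
    = c + ((entries.foldl
      (fun (st : PySem.Set String × List String) entry =>
        match (PySem.Dict.mk entry).get? "alias" with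
        | none => st
        | some al =>
          if PySem.Set.contains st.1 al then st
          else (PySem.Set.add st.1 al, st.2 ++ [al])) (s, l)).2.length : Int) := by
  induction entries generalizing d c s l with
  | nil => simp
  | cons e rest ih =>
    simp only [List.foldl_cons]
    cases hget : (PySem.Dict.mk e).get? "alias" with
    | none => exact ih d c s l h
    | some al =>
      by_cases hc : PySem.Set.contains s al = true
      · simp only [h al, hc, if_true]
        exact ih d c s l h
      · simp only [h al, hc, if_false, Bool.false_eq_true]
        have h' : ∀ a : String, (d.insert al (pvFmt03 c)).contains a
            = PySem.Set.contains (PySem.Set.add s al) a := by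
          intro a
          rw [PySem.Dict.contains_insert, h a]
          simp only [PySem.Set.contains, PySem.Set.add] at hc ⊢
          rw [if_neg hc]
          by_cases ha : a = al
          · subst ha; simp
          · simp [ha]
        have := ih (d.insert al (pvFmt03 c)) (c + 1) (PySem.Set.add s al) (l ++ [al]) h'
        simp only [List.length_append, List.length_cons, List.length_nil] at this ⊢
        omega

-- ===== VERDICT (by name: the statement is the Claim_ definition above) =====
theorem assign_recipe_ids_spec : Claim_equal_assign_recipe_ids := by
  intro entries lookup start_counter _hdom _hpre
  show _ = _
  unfold assign_recipe_ids assign_recipe_ids_alt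
  have h0 : ∀ a : String, (PySem.Dict.mk lookup).contains a
      = PySem.Set.contains (PySem.Set.ofList ((PySem.Dict.mk lookup).keys)) a := by
    intro a
    rw [Bool.eq_iff_iff, PySem.Dict.contains_iff_mem_keys]
    simp [PySem.Set.contains, PySem.Set.mem_ofList]
  have := pv_fold_invariant entries (PySem.Dict.mk lookup) start_counter
    (PySem.Set.ofList ((PySem.Dict.mk lookup).keys)) [] h0
  simp only [List.length_nil, Int.natCast_zero, add_zero] at this
  omega
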